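-- pv_equiv track=rewrite | github.com/Rey-Of-Sunshine/SemPr | olimp.py | dliname
-- ===== SOURCE A (Python) =====
-- def dliname(n):
--     g=-1
--     dl=0
--     for k in range(len(n)):
--         if n[k]==' ':
--             g=k
--             break
--     for i in range(g+1, len(n)):
--         dl+=1
--         if n[i]==' ':
--             dl-=1
--             break
--     return dl
-- ===== SOURCE B (Python) =====
-- def dliname(n):
--     words = n.split(' ')
--     return len(words[1]) if len(words) > 1 else len(words[0])
-- ===== Notes on version B (the rewrite author's own statement) =====
-- stated objective: idiomatic
-- what changed: Replaces A's two sequential manual index-scanning loops (find first space, then count until next space) with a single tokenization via str.split followed by an index lookup, falling back to the first token when there is only one.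
import Mathlib
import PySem

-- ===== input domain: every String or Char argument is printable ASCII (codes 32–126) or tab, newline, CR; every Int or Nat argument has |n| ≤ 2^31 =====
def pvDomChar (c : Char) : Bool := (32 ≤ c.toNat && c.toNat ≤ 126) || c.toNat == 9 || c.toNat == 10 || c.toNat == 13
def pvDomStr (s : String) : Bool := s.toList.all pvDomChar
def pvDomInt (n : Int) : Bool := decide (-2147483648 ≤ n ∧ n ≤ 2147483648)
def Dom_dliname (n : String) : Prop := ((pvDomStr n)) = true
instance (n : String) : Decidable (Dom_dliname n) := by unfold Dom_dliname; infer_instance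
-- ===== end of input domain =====

-- B replaces A's two manual index-scanning loops by one split(' ') and an index lookup (idiomatic).

-- ===== PORT A =====
-- first loop of A: scan for the first space, returning its index k, or -1 if none
def dlinameFindSpace (cs : List Char) (k : Int) : Int :=
  match cs with
  | [] => -1
  | c :: rest => if c = ' ' then k else dlinameFindSpace rest (k + 1)

-- second loop of A over indices g+1 … len-1 (here: over the dropped suffix): dl += 1, undo and break at a space
def dlinameCount (cs : List Char) (dl : Int) : Int :=
  match cs with
  | [] => dl
  | c :: rest => if c = ' ' then (dl + 1) - 1 else dlinameCount rest (dl + 1)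

def dliname (n : String) : Int :=
  let cs := n.toList
  let g := dlinameFindSpace cs 0
  dlinameCount (cs.drop (g + 1).toNat) 0

-- ===== PORT B =====
def dliname_alt (n : String) : Int :=
  let words := (PySem.Str.split? n " ").getD []
  match words with
  | _ :: w1 :: _ => PySem.Str.len w1
  | [w0] => PySem.Str.len w0
  | [] => 0   -- unreachable: split always yields at least one token

-- ===== PRECONDITION & SPEC =====
def Spec_dliname (n : String) (out : Int) : Prop := out = dliname_alt n
instance (n : String) (out : Int) : Decidable (Spec_dliname n out) := by unfold Spec_dliname; infer_instance

-- ===== CLAIM (what is proved, stated in full; the proofs are below) =====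
def Claim_equal_dliname : Prop := ∀ (n : String), Dom_dliname n → Spec_dliname n (dliname n)

-- ===== LEMMAS AND PROOFS =====

-- reference splitter on a single space, structural on the list
def splitSp (cs : List Char) : List (List Char) :=
  match cs with
  | [] => [[]]
  | c :: rest => if c = ' ' then [] :: splitSp rest else (splitSp rest).modifyHead (c :: ·)

theorem splitSp_ne_nil (cs : List Char) : splitSp cs ≠ [] := by
  induction cs with
  | nil => simp [splitSp]
  | cons c rest ih =>
    simp only [splitSp]
    split_ifs
    · simp
    · cases h : splitSp rest with
      | nil => exact absurd h ih
      | cons a t => simp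

theorem splitOn_go_eq (fuel : Nat) : ∀ (l cur : List Char) (acc : List (List Char)),
    l.length ≤ fuel →
    PySem.Chars.splitOn.go [' '] fuel l cur acc
      = acc.reverse ++ (splitSp l).modifyHead (cur.reverse ++ ·) := by
  induction fuel with
  | zero =>
    intro l cur acc h
    have : l = [] := List.eq_nil_of_length_eq_zero (Nat.le_zero.mp h)
    subst this
    simp [PySem.Chars.splitOn.go, splitSp]
  | succ f ih =>
    intro l cur acc h
    cases l with
    | nil => simp [PySem.Chars.splitOn.go, splitSp]
    | cons c rest =>
      simp only [PySem.Chars.splitOn.go, List.isPrefixOf, Bool.and_true]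
      by_cases hc : c = ' '
      · subst hc
        rw [if_pos (by simp)]
        rw [ih _ [] (cur.reverse :: acc) (by simpa using Nat.le_of_succ_le_succ h)]
        simp only [splitSp, List.reverse_nil, List.nil_append]
        cases hr : splitSp rest with
        | nil => exact absurd hr (splitSp_ne_nil rest)
        | cons a t => simp [hr]
      · rw [if_neg (by simp [Ne.symm hc])]
        rw [ih rest (c :: cur) acc (Nat.le_of_succ_le_succ h)]
        simp only [splitSp, if_neg hc]
        cases hrest : splitSp rest with
        | nil => exact absurd hrest (splitSp_ne_nil rest)
        | cons a t => simp [hrest]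

theorem splitOn_space_eq (cs : List Char) : PySem.Chars.splitOn cs [' '] = splitSp cs := by
  unfold PySem.Chars.splitOn
  rw [splitOn_go_eq (cs.length + 1) cs [] [] (Nat.le_succ _)]
  cases h : splitSp cs with
  | nil => exact absurd h (splitSp_ne_nil cs)
  | cons a t => simp

theorem splitSp_no_space (cs : List Char) (h : ' ' ∉ cs) : splitSp cs = [cs] := by
  induction cs with
  | nil => rfl
  | cons c rest ih =>
    simp only [List.mem_cons, not_or] at h
    simp [splitSp, Ne.symm h.1, ih h.2]

theorem splitSp_append (pre post : List Char) (h : ' ' ∉ pre) :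
    splitSp (pre ++ ' ' :: post) = pre :: splitSp post := by
  induction pre with
  | nil => simp [splitSp]
  | cons c p ih =>
    simp only [List.mem_cons, not_or] at h
    simp [splitSp, Ne.symm h.1, ih h.2]

theorem countLen_eq (cs : List Char) : ∀ dl : Int,
    dlinameCount cs dl = dl + ((splitSp cs).headI).length := by
  induction cs with
  | nil => intro dl; simp [dlinameCount, splitSp]
  | cons c rest ih =>
    intro dl
    by_cases hc : c = ' '
    · subst hc; simp [dlinameCount, splitSp]
    · simp only [dlinameCount, if_neg hc, splitSp, ih]
      cases h : splitSp rest with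
      | nil => exact absurd h (splitSp_ne_nil rest)
      | cons a t => simp; omega

theorem findSpace_no_space (cs : List Char) (h : ' ' ∉ cs) :
    ∀ k : Int, dlinameFindSpace cs k = -1 := by
  induction cs with
  | nil => intro k; rfl
  | cons c rest ih =>
    simp only [List.mem_cons, not_or] at h
    intro k
    simp [dlinameFindSpace, Ne.symm h.1, ih h.2]

theorem findSpace_append (pre post : List Char) (h : ' ' ∉ pre) :
    ∀ k : Int, dlinameFindSpace (pre ++ ' ' :: post) k = k + pre.length := by
  induction pre with
  | nil => intro k; simp [dlinameFindSpace]
  | cons c p ih =>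
    simp only [List.mem_cons, not_or] at h
    intro k
    simp only [List.cons_append, dlinameFindSpace, if_neg (Ne.symm h.1), ih h.2]
    push_cast [List.length_cons]
    ring

-- dliname_alt, computed through splitSp
theorem alt_eq (n : String) :
    dliname_alt n
      = (match splitSp n.toList with
         | _ :: w1 :: _ => (w1.length : Int)
         | [w0] => (w0.length : Int)
         | [] => 0) := by
  have h1 : (" " : String).toList = [' '] := by decide
  have h2 : PySem.Chars.split? n.toList [' '] = some (splitSp n.toList) := by
    unfold PySem.Chars.split?
    simp [splitOn_space_eq]
  unfold dliname_alt PySem.Str.split?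
  rw [h1, h2]
  simp only [Option.map_some, Option.getD_some]
  cases h : splitSp n.toList with
  | nil => exact absurd h (splitSp_ne_nil _)
  | cons a t =>
    cases t with
    | nil => simp [PySem.Str.len]
    | cons b t' => simp [PySem.Str.len]

-- ===== VERDICT (by name: the statement is the Claim_ definition above) =====
theorem dliname_spec : Claim_equal_dliname := by
  intro n _
  unfold Spec_dliname
  rw [alt_eq]
  show dlinameCount (n.toList.drop (dlinameFindSpace n.toList 0 + 1).toNat) 0 = _
  by_cases hs : ' ' ∈ n.toList
  · -- cs = pre ++ ' ' :: post with pre space-free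
    obtain ⟨pre, post, hp, hdec⟩ :
        ∃ pre post, ' ' ∉ pre ∧ n.toList = pre ++ ' ' :: post := by
      cases hd : n.toList.dropWhile (fun c => !(c = ' ')) with
      | nil =>
        exfalso
        have := List.dropWhile_eq_nil_iff.mp hd ' ' hs
        simp at this
      | cons d ds =>
        have hhead := List.head_dropWhile_not (p := fun c => !(c = ' ')) (l := n.toList)
          (by rw [hd]; simp)
        simp [hd] at hhead
        refine ⟨n.toList.takeWhile (fun c => !(c = ' ')), ds, ?_, ?_⟩
        · intro hmem
          have := List.mem_takeWhile_imp hmem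
          simp at this
        · conv_lhs => rw [← List.takeWhile_append_dropWhile (p := fun c => !(c = ' ')) (l := n.toList)]
          rw [hd, hhead]
    rw [hdec, findSpace_append pre post hp 0, splitSp_append pre post hp]
    have hnn : ((0 : Int) + (pre.length : Int) + 1).toNat = pre.length + 1 := by omega
    rw [hnn]
    rw [show pre ++ ' ' :: post = (pre ++ [' ']) ++ post from by simp,
      List.drop_left' (by simp)]
    rw [countLen_eq]
    cases h : splitSp post with
    | nil => exact absurd h (splitSp_ne_nil post)
    | cons a t => simp
  · rw [findSpace_no_space n.toList hs 0]
    norm_num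
    rw [countLen_eq, splitSp_no_space n.toList hs]
    simp
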